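-- pv_equiv track=rewrite | github.com/shanguanma/speaker_diarization | egs/alimeeting/ssnd/simu_diar_dataset.py | _find_silence_regions
-- ===== SOURCE A (Python) =====
-- def _find_silence_regions(active, min_len=1, value=0):
--     # active: 0/1 array, value: 0(静音) or 1(有声/重叠)
--     regions = []
--     cur = 0
--     start = None
--     for i, v in enumerate(active):
--         if v == value:
--             if start is None:
--                 start = i
--             cur += 1
--         else:
--             if cur >= min_len:
--                 regions.append((start, i))
--             cur = 0
--             start = None
--     if cur >= min_len:
--         regions.append((start, len(active)))
--     return regions
-- ===== SOURCE B (Python) =====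
-- from itertools import groupby
--
-- def _find_silence_regions(active, min_len=1, value=0):
--     regions = []
--     offset = 0
--     for key, grp in groupby(active):
--         length = sum(1 for _ in grp)
--         if key == value and length >= min_len:
--             regions.append((offset, offset + length))
--         offset += length
--     return regions
-- ===== Notes on version B (the rewrite author's own statement) =====
-- stated objective: idiomatic
-- what changed: Replaced the per-element cur/start state machine (with a separate trailing-region check) by an itertools.groupby scan over maximal runs with an offset cursor, emitting a region per qualifying run.
-- outside the precondition, e.g. on _find_silence_regions([0, 1, 0], -1, 0): A returns [(0, 1), (2, 3)], B returns [(0, 1), (2, 3)]; on _find_silence_regions([1], 0, 0): A returns [(None, 0), (None, 1)], B returns []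
import Mathlib
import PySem

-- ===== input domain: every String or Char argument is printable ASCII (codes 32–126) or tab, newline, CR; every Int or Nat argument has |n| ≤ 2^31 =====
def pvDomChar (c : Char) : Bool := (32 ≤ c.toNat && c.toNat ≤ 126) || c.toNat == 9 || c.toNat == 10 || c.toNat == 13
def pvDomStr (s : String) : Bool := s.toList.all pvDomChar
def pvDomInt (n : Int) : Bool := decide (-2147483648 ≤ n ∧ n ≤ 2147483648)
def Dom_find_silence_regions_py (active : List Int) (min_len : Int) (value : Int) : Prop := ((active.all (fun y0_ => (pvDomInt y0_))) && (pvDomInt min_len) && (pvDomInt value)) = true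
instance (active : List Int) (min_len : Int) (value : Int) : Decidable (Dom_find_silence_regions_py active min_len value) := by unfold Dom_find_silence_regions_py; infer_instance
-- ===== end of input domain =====

-- B replaces A's per-element cur/start state machine (with its separate trailing-region check)
-- by a scan over maximal runs of equal values with an offset cursor (itertools.groupby in Python).
-- Equivalence of the RETURN value is proved for min_len ≥ 1 (Pre_); same O(n) cost, objective: idiomatic.

-- ===== PORT A =====
-- loop body of A's for-loop: state = (regions, cur, start)
def pvStepA (min_len value : Int) (s : List (Int × Int) × Int × Option Int) (iv : Int × Int) : List (Int × Int) × Int × Option Int :=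
  if iv.2 = value then
    (s.1, s.2.1 + 1, if s.2.2 = none then some iv.1 else s.2.2)
  else
    (if min_len ≤ s.2.1 then s.1 ++ [(s.2.2.getD 0, iv.1)] else s.1, 0, none)

def find_silence_regions_py (active : List Int) (min_len : Int) (value : Int) : List (Int × Int) :=
  let r := (PySem.List.enumerate active).foldl (pvStepA min_len value) ([], 0, none)
  -- Python's trailing append uses `start`, which is None only when min_len ≤ 0 (outside Pre_); `getD 0` stands for that unreachable None
  if min_len ≤ r.2.1 then r.1 ++ [(r.2.2.getD 0, (active.length : Int))] else r.1

-- ===== PORT B =====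
-- one groupby group = head x plus the longest prefix of equal elements; offset advances by the run length
def pvAltGo (min_len value : Int) : List Int → Int → List (Int × Int)
  | [], _ => []
  | x :: t, off =>
    let len : Int := 1 + (t.takeWhile (fun y => y == x)).length
    (if x = value ∧ min_len ≤ len then [(off, off + len)] else []) ++
      pvAltGo min_len value (t.dropWhile (fun y => y == x)) (off + len)
termination_by l _ => l.length
decreasing_by simpa using Nat.lt_succ_of_le (List.length_dropWhile_le (fun y => y == x) t)

def find_silence_regions_py_alt (active : List Int) (min_len : Int) (value : Int) : List (Int × Int) :=
  pvAltGo min_len value active 0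

-- ===== PRECONDITION & SPEC =====
-- Pre_ requires min_len ≥ 1 (the parameter's natural domain; its default is 1): with min_len ≤ 0 A
-- appends pairs whose first component is Python's None — not an int — whenever a zero-length run
-- qualifies (first/last element not equal to value, two adjacent such elements, or empty input).
def Pre_find_silence_regions_py (active : List Int) (min_len : Int) (value : Int) : Prop := 1 ≤ min_len
instance (active : List Int) (min_len : Int) (value : Int) : Decidable (Pre_find_silence_regions_py active min_len value) := by unfold Pre_find_silence_regions_py; infer_instance
def pvWitness_find_silence_regions_py : List Int × Int × Int := ([0, 1, 0, 0], 1, 0)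

def Spec_find_silence_regions_py (active : List Int) (min_len : Int) (value : Int) (out : List (Int × Int)) : Prop := out = find_silence_regions_py_alt active min_len value
instance (active : List Int) (min_len : Int) (value : Int) (out : List (Int × Int)) : Decidable (Spec_find_silence_regions_py active min_len value out) := by unfold Spec_find_silence_regions_py; infer_instance

-- ===== CLAIM (what is proved, stated in full; the proofs are below) =====
def Claim_equal_find_silence_regions_py : Prop := ∀ (active : List Int) (min_len : Int) (value : Int), Dom_find_silence_regions_py active min_len value → Pre_find_silence_regions_py active min_len value → Spec_find_silence_regions_py active min_len value (find_silence_regions_py active min_len value)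

-- ===== LEMMAS AND PROOFS =====

-- skipping one element that is not the target value only shifts B's offset
theorem pvAltGo_cons_ne (min_len value x : Int) (hx : x ≠ value) (t : List Int) (i : Int) :
    pvAltGo min_len value (x :: t) i = pvAltGo min_len value t (i + 1) := by
  match t with
  | [] => simp [pvAltGo, hx]
  | y :: u =>
    by_cases hyx : y = x
    · subst hyx
      rw [pvAltGo, pvAltGo]
      simp [hx]
      congr 1
      ring
    · rw [pvAltGo]
      simp [hx, hyx]

-- A's loop over a run of target-valued elements just counts them
theorem pvRunA (min_len value : Int) (r : List Int) (hr : ∀ y ∈ r, y = value) :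
    ∀ (j s0 cur : Int) (regions : List (Int × Int)),
      (PySem.List.enumerate r j).foldl (pvStepA min_len value) (regions, cur, some s0)
        = (regions, cur + r.length, some s0) := by
  induction r with
  | nil => intro j s0 cur regions; simp [PySem.List.enumerate]
  | cons y t ih =>
    intro j s0 cur regions
    have hy : y = value := hr y (by simp)
    rw [PySem.List.enumerate_cons, List.foldl_cons]
    rw [show pvStepA min_len value (regions, cur, some s0) (j, y) = (regions, cur + 1, some s0) by
      simp [pvStepA, hy]]
    rw [ih (fun z hz => hr z (by simp [hz])) (j+1) s0 (cur+1) regions]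
    simp; ring

-- main invariant: A's loop + trailing check, started at index i with accumulated regions,
-- equals regions ++ B's run scan from offset i
theorem pvMain (min_len value : Int) (h : 1 ≤ min_len) :
    ∀ (n : ℕ) (active : List Int), active.length ≤ n → ∀ (i : Int) (regions : List (Int × Int)),
      (let r := (PySem.List.enumerate active i).foldl (pvStepA min_len value) (regions, 0, none)
       if min_len ≤ r.2.1 then r.1 ++ [(r.2.2.getD 0, i + active.length)] else r.1)
        = regions ++ pvAltGo min_len value active i := by
  intro n
  induction n with
  | zero =>
    intro active hlen i regions
    have : active = [] := List.eq_nil_of_length_eq_zero (Nat.le_zero.mp hlen)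
    subst this
    simp [PySem.List.enumerate, pvAltGo]
    omega
  | succ m ih =>
    intro active hlen i regions
    match active with
    | [] =>
      simp [PySem.List.enumerate, pvAltGo]
      omega
    | x :: t =>
      by_cases hx : x = value
      · subst hx
        obtain ⟨tw, dw, htw, hdw⟩ : ∃ tw dw, tw = t.takeWhile (fun y => y == x) ∧ dw = t.dropWhile (fun y => y == x) := ⟨_, _, rfl, rfl⟩
        have hsplit : t = tw ++ dw := by rw [htw, hdw]; exact (List.takeWhile_append_dropWhile).symm
        have htwv : ∀ y ∈ tw, y = x := by
          intro y hy
          rw [htw] at hy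
          have := List.mem_takeWhile_imp hy
          simpa using this
        rw [pvAltGo]
        simp only [← htw, ← hdw]
        rw [PySem.List.enumerate_cons, List.foldl_cons]
        rw [show pvStepA min_len x (regions, 0, none) (i, x) = (regions, 1, some i) by
          simp [pvStepA]]
        conv_lhs => rw [hsplit]
        rw [PySem.List.enumerate_append, List.foldl_append]
        rw [pvRunA min_len x tw htwv (i+1) i 1 regions]
        cases dw with
        | nil =>
          simp only [PySem.List.enumerate_nil, List.foldl_nil, pvAltGo, List.append_nil]
          have hlent : t.length = tw.length := by conv_lhs => rw [hsplit]; simp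
          simp only [List.length_cons, hlent, Option.getD_some, List.length_nil]
          have e1 : i + (((tw.length + 1 : ℕ)) : Int) = i + (1 + (tw.length : Int)) := by push_cast; ring
          rw [e1]
          simp only [true_and, eq_self_iff_true]
          split_ifs with h1 <;> simp
        | cons y u =>
          have hyx : (y == x) = false := by
            have hh := List.head?_dropWhile_not (fun z => z == x) t
            rw [← hdw] at hh
            simpa using hh
          have hyv : y ≠ x := by simpa using hyx
          rw [PySem.List.enumerate_cons, List.foldl_cons]
          rw [show pvStepA min_len x (regions, 1 + (tw.length:Int), some i) ((i+1)+(tw.length:Int), y)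
              = ((if min_len ≤ 1 + (tw.length:Int) then regions ++ [(i, (i+1)+(tw.length:Int))] else regions), 0, none) by
            simp [pvStepA, hyv]]
          have hulen : u.length ≤ m := by
            have : t.length = tw.length + (u.length + 1) := by conv_lhs => rw [hsplit]; simp
            simp at hlen; omega
          have hIH := ih u hulen ((i+1)+(tw.length:Int)+1)
            (if min_len ≤ 1 + (tw.length:Int) then regions ++ [(i, (i+1)+(tw.length:Int))] else regions)
          simp only at hIH ⊢
          have hend : i + (((x :: (tw ++ y :: u)).length : ℕ) : Int) = ((i+1)+(tw.length:Int)+1) + (u.length : Int) := by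
            simp only [List.length_cons, List.length_append]; push_cast; ring
          rw [hend, hIH]
          rw [pvAltGo_cons_ne min_len x y hyv u (i + (1 + (tw.length:Int)))]
          have eoff : i + (1 + (tw.length:Int)) + 1 = (i+1)+(tw.length:Int)+1 := by ring
          rw [eoff]
          simp only [true_and, eq_self_iff_true]
          split_ifs with h1 <;> simp <;> ring
      · rw [PySem.List.enumerate_cons, List.foldl_cons]
        rw [show pvStepA min_len value (regions, 0, none) (i, x) = (regions, 0, none) by
          simp [pvStepA, hx]; omega]
        have hIH := ih t (by simpa using Nat.lt_succ_iff.mp (Nat.lt_of_lt_of_le (by simp) hlen)) (i+1) regions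
        simp only at hIH ⊢
        rw [show i + (((x :: t).length : ℕ) : Int) = (i+1) + (t.length : Int) by simp; ring]
        rw [hIH, pvAltGo_cons_ne min_len value x hx t i]

-- ===== VERDICT (by name: the statement is the Claim_ definition above) =====
theorem find_silence_regions_py_spec : Claim_equal_find_silence_regions_py := by
  intro active min_len value _ hpre
  unfold Spec_find_silence_regions_py find_silence_regions_py find_silence_regions_py_alt
  have := pvMain min_len value hpre active.length active le_rfl 0 []
  simpa [PySem.List.enumerate] using this
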